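-- pv_equiv track=rewrite | github.com/AmitShanbhoug/ITI-1120 | Assignments/Assignment 2/To Submit/a2_part2_8677407.py | alienNumbers
-- ===== SOURCE A (Python) =====
-- def alienNumbers(s):
--     ''' The function returns the numeric value of the number that s represents in the alien numbering system.
--
--         (str) -> int
--
--         Precondition: None
--     '''
--
--     i = 0
--     for char in s:
--         if ((s.count("T") or s.count("y") or s.count("!") or s.count("a") or s.count("N") or s.count("U")) >= 0):
--
--             a = (s.count("T") * 1024)
--             b = (s.count("y") * 598)
--             c = (s.count("!") * 121)
--             d = (s.count("a") * 42)
--             e = (s.count("N") * 6)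
--             f = (s.count("U") * 1)
--             i += (a+b+c+d+e+f)
--         return i
--
--     else:
--         return 0
-- ===== SOURCE B (Python) =====
-- def alienNumbers(s):
--     ''' Numeric value of s in the alien numbering system: one accumulating
--         pass over s with a weight table, instead of six full .count() scans. '''
--     weights = {'T': 1024, 'y': 598, '!': 121, 'a': 42, 'N': 6, 'U': 1}
--     total = 0
--     for ch in s:
--         total += weights.get(ch, 0)
--     return total
-- ===== Notes on version B (the rewrite author's own statement) =====
-- stated objective: simpler
-- what changed: B replaces A's six separate s.count() scans (inside a loop that returns on its first iteration, behind a vacuous guard) by a single accumulating pass over s with a weight table.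
import Mathlib
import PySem

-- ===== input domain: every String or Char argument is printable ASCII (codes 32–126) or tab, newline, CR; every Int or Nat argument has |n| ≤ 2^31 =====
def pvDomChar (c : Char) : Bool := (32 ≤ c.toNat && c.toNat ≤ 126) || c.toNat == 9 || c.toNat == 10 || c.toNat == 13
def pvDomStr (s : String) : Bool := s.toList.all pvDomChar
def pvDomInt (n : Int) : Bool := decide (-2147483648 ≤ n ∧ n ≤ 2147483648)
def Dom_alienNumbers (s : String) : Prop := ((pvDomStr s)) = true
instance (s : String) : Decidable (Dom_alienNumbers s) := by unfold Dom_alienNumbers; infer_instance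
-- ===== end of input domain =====

-- B replaces A's six separate s.count() scans (inside a loop that returns on its
-- first iteration, behind a vacuous guard) by a single accumulating pass with a
-- weight table; same return value on every input.

-- ===== PORT A =====
-- `for char in s: … return i` returns inside the FIRST iteration (the guard
-- `(… or …) >= 0` is always true), so the loop body runs once iff s is nonempty;
-- the `else` branch of the for returns 0 for empty s.
def alienNumbers (s : String) : Int :=
  match s.toList with
  | [] => 0
  | _ :: _ =>
    let a : Int := (PySem.Str.count s "T" : Int) * 1024
    let b : Int := (PySem.Str.count s "y" : Int) * 598
    let c : Int := (PySem.Str.count s "!" : Int) * 121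
    let d : Int := (PySem.Str.count s "a" : Int) * 42
    let e : Int := (PySem.Str.count s "N" : Int) * 6
    let f : Int := (PySem.Str.count s "U" : Int) * 1
    0 + (a + b + c + d + e + f)

-- ===== PORT B =====
def bWeights : PySem.Dict Char Int :=
  (((((PySem.Dict.empty.insert 'T' 1024).insert 'y' 598).insert '!' 121).insert
      'a' 42).insert 'N' 6).insert 'U' 1

def alienNumbers_alt (s : String) : Int :=
  s.toList.foldl (fun total ch => total + bWeights.getD ch 0) 0

-- ===== PRECONDITION & SPEC =====
def Spec_alienNumbers (s : String) (out : Int) : Prop := out = alienNumbers_alt s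
instance (s : String) (out : Int) : Decidable (Spec_alienNumbers s out) := by unfold Spec_alienNumbers; infer_instance

-- ===== CLAIM (what is proved, stated in full; the proofs are below) =====
def Claim_equal_alienNumbers : Prop := ∀ (s : String), Dom_alienNumbers s → Spec_alienNumbers s (alienNumbers s)

-- ===== LEMMAS AND PROOFS =====

-- single-character substring count is character count
theorem chars_count_go_single (v : Char) (l : List Char) (fuel : Nat) (acc : Nat)
    (h : l.length ≤ fuel) :
    PySem.Chars.count.go [v] fuel l acc = acc + l.count v := by
  induction l generalizing fuel acc with
  | nil => cases fuel <;> simp [PySem.Chars.count.go]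
  | cons c t ih =>
    cases fuel with
    | zero => simp at h
    | succ n =>
      simp only [List.length_cons, Nat.succ_le_succ_iff] at h
      by_cases hc : c = v
      · subst hc
        simp [PySem.Chars.count.go, List.isPrefixOf, ih _ _ h]
        omega
      · have : ([v].isPrefixOf (c :: t)) = false := by
          simp [List.isPrefixOf]; exact fun hv => (hc hv.symm).elim
        simp [PySem.Chars.count.go, this, ih _ _ h, hc]

theorem chars_count_single (l : List Char) (v : Char) :
    PySem.Chars.count l [v] = l.count v := by
  have := chars_count_go_single v l l.length 0 (le_refl _)
  simpa [PySem.Chars.count] using this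

-- the weight table as an if-chain
def wval (c : Char) : Int :=
  if c = 'T' then 1024 else if c = 'y' then 598 else if c = '!' then 121
  else if c = 'a' then 42 else if c = 'N' then 6 else if c = 'U' then 1 else 0

theorem bWeights_getD (c : Char) : bWeights.getD c 0 = wval c := by
  by_cases h1 : c = 'T'; · subst h1; decide
  by_cases h2 : c = 'y'; · subst h2; decide
  by_cases h3 : c = '!'; · subst h3; decide
  by_cases h4 : c = 'a'; · subst h4; decide
  by_cases h5 : c = 'N'; · subst h5; decide
  by_cases h6 : c = 'U'; · subst h6; decide
  have t1 : ('T' == c) = false := beq_eq_false_iff_ne.mpr (Ne.symm h1)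
  have t2 : ('y' == c) = false := beq_eq_false_iff_ne.mpr (Ne.symm h2)
  have t3 : ('!' == c) = false := beq_eq_false_iff_ne.mpr (Ne.symm h3)
  have t4 : ('a' == c) = false := beq_eq_false_iff_ne.mpr (Ne.symm h4)
  have t5 : ('N' == c) = false := beq_eq_false_iff_ne.mpr (Ne.symm h5)
  have t6 : ('U' == c) = false := beq_eq_false_iff_ne.mpr (Ne.symm h6)
  simp [bWeights, wval, PySem.Dict.getD, PySem.Dict.get?, PySem.Dict.insert,
    PySem.Dict.empty, List.find?, t1, t2, t3, t4, t5, t6, h1, h2, h3, h4, h5, h6]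

-- sum-of-weights characterisation
def wsum (l : List Char) : Int :=
  (l.count 'T' : Int) * 1024 + (l.count 'y' : Int) * 598 + (l.count '!' : Int) * 121
    + (l.count 'a' : Int) * 42 + (l.count 'N' : Int) * 6 + (l.count 'U' : Int) * 1

theorem foldl_wval (l : List Char) (a : Int) :
    l.foldl (fun total ch => total + bWeights.getD ch 0) a = a + wsum l := by
  induction l generalizing a with
  | nil => simp [wsum]
  | cons c t ih =>
    rw [List.foldl_cons, ih]
    have hws : wsum (c :: t) = wval c + wsum t := by
      simp only [wsum, wval, List.count_cons]
      by_cases h1 : c = 'T' <;> by_cases h2 : c = 'y' <;> by_cases h3 : c = '!' <;>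
        by_cases h4 : c = 'a' <;> by_cases h5 : c = 'N' <;> by_cases h6 : c = 'U' <;>
        simp_all <;> ring
    rw [hws, bWeights_getD]; ring

-- ===== VERDICT (by name: the statement is the Claim_ definition above) =====
theorem alienNumbers_spec : Claim_equal_alienNumbers := by
  intro s _
  unfold Spec_alienNumbers alienNumbers alienNumbers_alt
  rw [foldl_wval]
  have hT : PySem.Str.count s "T" = s.toList.count 'T' := chars_count_single s.toList 'T'
  have hy : PySem.Str.count s "y" = s.toList.count 'y' := chars_count_single s.toList 'y'
  have hb : PySem.Str.count s "!" = s.toList.count '!' := chars_count_single s.toList '!'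
  have ha : PySem.Str.count s "a" = s.toList.count 'a' := chars_count_single s.toList 'a'
  have hN : PySem.Str.count s "N" = s.toList.count 'N' := chars_count_single s.toList 'N'
  have hU : PySem.Str.count s "U" = s.toList.count 'U' := chars_count_single s.toList 'U'
  cases h : s.toList with
  | nil => simp [wsum]
  | cons c t =>
    simp only [hT, hy, hb, ha, hN, hU, wsum, h, zero_add]
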